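-- pv_equiv track=rewrite | github.com/JK0201/Algorithm | 프로그래머스/0/181894. 2의 영역/2의 영역.py | solution
-- ===== SOURCE A (Python) =====
-- def solution(arr):
--     if 2 not in arr:
--         return [-1]
--
--     answer = []
--     left = 0
--     right = len(arr) - 1
--
--     while left < right:
--         if arr[left] != 2:
--             left += 1
--
--         if arr[right] != 2:
--             right -= 1
--
--         if arr[left] == 2 and arr[right] == 2:
--             break
--
--     answer = arr[left:right+1]
--     return answer
-- ===== SOURCE B (Python) =====
-- def solution(arr):
--     xs = arr[::-1]
--     while xs and xs[-1] != 2: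
--         xs.pop()
--     xs.reverse()
--     while xs and xs[-1] != 2:
--         xs.pop()
--     return xs if xs else [-1]
-- ===== Notes on version B (the rewrite author's own statement) =====
-- stated objective: alternative
-- what changed: Replaces A's membership pre-check plus converging two-pointer index loop and slice by index-free trimming: reverse the list, pop trailing non-2s (removing the original leading non-2s), reverse back, pop trailing non-2s, and return [-1] only if nothing is left.
import Mathlib
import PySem

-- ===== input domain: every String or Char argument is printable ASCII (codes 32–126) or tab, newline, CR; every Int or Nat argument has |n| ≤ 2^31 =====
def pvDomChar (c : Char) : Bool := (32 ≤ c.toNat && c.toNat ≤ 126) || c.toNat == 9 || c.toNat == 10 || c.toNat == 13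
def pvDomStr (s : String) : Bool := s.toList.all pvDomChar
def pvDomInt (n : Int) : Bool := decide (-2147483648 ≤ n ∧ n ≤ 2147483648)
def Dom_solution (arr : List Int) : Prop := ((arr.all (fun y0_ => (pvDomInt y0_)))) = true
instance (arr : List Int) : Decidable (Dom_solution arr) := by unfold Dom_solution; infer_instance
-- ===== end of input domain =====

-- B replaces A's membership pre-check + converging two-pointer index loop + slice by index-free trimming (reverse, pop trailing non-2s, reverse, pop trailing non-2s); same O(n) cost.


-- ===== PORT A =====
-- the while-loop of A: moves left/right inward (each step of each pointer guarded by !=2),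
-- breaks when both point at a 2; returns the final (left, right) pair
def solutionLoop (arr : List Int) (left right : Int) : Int × Int :=
  if h : left < right then
    let l1 := if PySem.List.pyGet? arr left ≠ some 2 then left + 1 else left
    let r1 := if PySem.List.pyGet? arr right ≠ some 2 then right - 1 else right
    if hb : PySem.List.pyGet? arr l1 = some 2 ∧ PySem.List.pyGet? arr r1 = some 2 then
      (l1, r1)
    else
      solutionLoop arr l1 r1
  else
    (left, right)
termination_by (right - left).toNat
decreasing_by
  simp only [l1, r1] at hb ⊢
  split_ifs at hb ⊢ <;> simp_all <;> omega

def solution (arr : List Int) : List Int :=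
  if 2 ∉ arr then [-1]
  else
    let p := solutionLoop arr 0 ((arr.length : Int) - 1)
    PySem.List.slice arr (some p.1) (some (p.2 + 1))

-- ===== PORT B =====
-- 'while xs and xs[-1] != 2: xs.pop()'  — pop the last element while it is not 2
def popTrim (xs : List Int) : List Int :=
  if h : xs ≠ [] then
    if xs.getLast h ≠ 2 then popTrim xs.dropLast else xs
  else xs
termination_by xs.length
decreasing_by
  have := List.length_pos_of_ne_nil h
  simp [List.length_dropLast]
  omega

def solution_alt (arr : List Int) : List Int :=
  let xs := arr.reverse            -- xs = arr[::-1]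
  let xs1 := popTrim xs            -- first pop loop (removes arr's leading non-2s)
  let xs2 := popTrim xs1.reverse   -- xs.reverse(); second pop loop (removes trailing non-2s)
  if xs2 = [] then [-1] else xs2   -- 'return xs if xs else [-1]'

-- ===== PRECONDITION & SPEC =====
def Spec_solution (arr : List Int) (out : List Int) : Prop := out = solution_alt arr
instance (arr : List Int) (out : List Int) : Decidable (Spec_solution arr out) := by unfold Spec_solution; infer_instance

-- ===== CLAIM (what is proved, stated in full; the proofs are below) =====
def Claim_equal_solution : Prop := ∀ (arr : List Int), Dom_solution arr → Spec_solution arr (solution arr)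

-- ===== LEMMAS AND PROOFS =====

-- popping the last element while ≠ 2 is dropWhile (≠ 2) on the reverse, reversed back
theorem popTrim_eq (xs : List Int) :
    popTrim xs = (xs.reverse.dropWhile (fun x => x ≠ 2)).reverse := by
  induction xs using List.reverseRecOn with
  | nil => simp [popTrim]
  | append_singleton ys v ih =>
    rw [popTrim, dif_pos (by simp : (ys ++ [v]) ≠ [])]
    by_cases hv : v = 2
    · simp [hv]
    · simp [hv, ih]

-- if the first j elements fail to be 2 and the j-th is 2, dropWhile (≠2) = drop j
theorem dropWhile_eq_drop_of_first (l : List Int) (j : Nat)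
    (hj : j < l.length) (h2 : l[j] = 2)
    (hmin : ∀ k (hk : k < l.length), k < j → l[k] ≠ 2) :
    l.dropWhile (fun x => x ≠ 2) = l.drop j := by
  induction l generalizing j with
  | nil => simp at hj
  | cons a tl ih =>
    cases j with
    | zero =>
      have ha : a = 2 := by simpa using h2
      simp [ha]
    | succ k =>
      have ha : a ≠ 2 := by
        have := hmin 0 (by simp) (by omega)
        simpa using this
      simp only [List.dropWhile_cons, ha, ne_eq, not_false_iff, decide_true, if_pos,
        List.drop_succ_cons]
      exact ih k (by simpa using hj) (by simpa using h2)
        (fun m hm hmk => by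
          have := hmin (m+1) (by simpa using Nat.succ_lt_succ hm) (by omega)
          simpa using this)

-- the loop computes exactly (first index of 2, last index of 2), given a valid bracketing
theorem solutionLoop_eq (arr : List Int) (f L : Nat)
    (hfn : f < arr.length) (hLn : L < arr.length)
    (hf2 : arr[f] = 2) (hL2 : arr[L] = 2)
    (hfmin : ∀ j (_ : j < arr.length), j < f → arr[j] ≠ 2)
    (hLmax : ∀ j (_ : j < arr.length), L < j → arr[j] ≠ 2)
    (left right : Int)
    (hl0 : 0 ≤ left) (hlf : left ≤ (f : Int))
    (hrL : (L : Int) ≤ right) (hrn : right ≤ (arr.length : Int) - 1) :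
    solutionLoop arr left right = ((f : Int), (L : Int)) := by
  have hfL : f ≤ L := by
    by_contra hc
    exact hfmin L hLn (by omega) hL2
  have key : ∀ (i : Int), 0 ≤ i → i ≤ (f : Int) →
      (PySem.List.pyGet? arr i = some 2 ↔ i = (f : Int)) := by
    intro i h0 hif
    have hi : i.toNat < arr.length := by omega
    rw [PySem.List.pyGet?_eq_some_getElem arr h0 (by omega)]
    constructor
    · intro h
      by_contra hne
      exact hfmin i.toNat hi (by omega) (by simpa using h)
    · intro h
      subst h; simp [hf2]
  have keyR : ∀ (i : Int), (L : Int) ≤ i → i ≤ (arr.length : Int) - 1 →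
      (PySem.List.pyGet? arr i = some 2 ↔ i = (L : Int)) := by
    intro i hLi hin
    have h0 : 0 ≤ i := by omega
    have hi : i.toNat < arr.length := by omega
    rw [PySem.List.pyGet?_eq_some_getElem arr h0 (by omega)]
    constructor
    · intro h
      by_contra hne
      exact hLmax i.toNat hi (by omega) (by simpa using h)
    · intro h
      subst h; simp [hL2]
  -- strong induction on the gap
  have main : ∀ n (left right : Int), (right - left).toNat ≤ n →
      0 ≤ left → left ≤ (f : Int) → (L : Int) ≤ right → right ≤ (arr.length : Int) - 1 →
      solutionLoop arr left right = ((f : Int), (L : Int)) := by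
    intro n
    induction n with
    | zero =>
      intro left right hgap h0 hlf hrL hrn
      rw [solutionLoop, dif_neg (by omega : ¬ left < right)]
      simp only [Prod.mk.injEq]
      omega
    | succ n ih =>
      intro left right hgap h0 hlf hrL hrn
      rw [solutionLoop]
      by_cases hlr : left < right
      · rw [dif_pos hlr]
        simp only []
        set l1 := if PySem.List.pyGet? arr left ≠ some 2 then left + 1 else left with hl1
        set r1 := if PySem.List.pyGet? arr right ≠ some 2 then right - 1 else right with hr1
        have hl1b : 0 ≤ l1 ∧ l1 ≤ (f : Int) ∧ left ≤ l1 := by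
          rw [hl1]; split_ifs with hc
          · have : left ≠ (f : Int) := fun h => hc ((key left h0 hlf).2 h)
            omega
          · omega
        have hr1b : (L : Int) ≤ r1 ∧ r1 ≤ (arr.length : Int) - 1 ∧ r1 ≤ right := by
          rw [hr1]; split_ifs with hc
          · have : right ≠ (L : Int) := fun h => hc ((keyR right hrL hrn).2 h)
            omega
          · omega
        by_cases hb : PySem.List.pyGet? arr l1 = some 2 ∧ PySem.List.pyGet? arr r1 = some 2
        · rw [dif_pos hb]
          have h1 : l1 = (f : Int) := (key l1 hl1b.1 hl1b.2.1).1 hb.1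
          have h2 : r1 = (L : Int) := (keyR r1 hr1b.1 hr1b.2.1).1 hb.2
          rw [h1, h2]
        · rw [dif_neg hb]
          -- gap strictly decreased: at least one pointer moved
          have hstep : (r1 - l1).toNat ≤ n := by
            by_cases hcl : PySem.List.pyGet? arr left ≠ some 2
            · have e1 : l1 = left + 1 := by rw [hl1, if_pos hcl]
              omega
            · by_cases hcr : PySem.List.pyGet? arr right ≠ some 2
              · have e2 : r1 = right - 1 := by rw [hr1, if_pos hcr]
                omega
              · exfalso
                apply hb
                constructor
                · rw [hl1, if_neg hcl]
                  exact not_ne_iff.mp hcl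
                · rw [hr1, if_neg hcr]
                  exact not_ne_iff.mp hcr
          exact ih l1 r1 hstep hl1b.1 hl1b.2.1 hr1b.1 hr1b.2.1
      · -- left = f = L = right
        rw [dif_neg hlr]
        simp only [Prod.mk.injEq]
        omega
  exact main (right - left).toNat left right le_rfl hl0 hlf hrL hrn

-- first index of 2 in the reversed list gives the last index of 2 in arr
theorem reverse_index_facts (arr : List Int) (j : Nat)
    (hj : PySem.List.index? arr.reverse 2 = some j) :
    ∃ hjn : j < arr.length,
      arr[arr.length - 1 - j] = 2 ∧
      ∀ k (_ : k < arr.length), arr.length - 1 - j < k → arr[k] ≠ 2 := by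
  obtain ⟨hjr, hv, hmin⟩ := PySem.List.getElem_of_index?_eq_some hj
  have hjn : j < arr.length := by simpa using hjr
  refine ⟨hjn, ?_, ?_⟩
  · rw [List.getElem_reverse] at hv
    exact hv
  · intro k hk hgt
    have hik : arr.length - 1 - k < j := by omega
    have := hmin (arr.length - 1 - k) hik
    rw [List.getElem_reverse] at this
    have hkk : arr.length - 1 - (arr.length - 1 - k) = k := by omega
    simp only [hkk] at this
    exact this

-- ===== VERDICT (by name: the statement is the Claim_ definition above) =====
theorem solution_spec : Claim_equal_solution := by
  intro arr _
  unfold Spec_solution solution solution_alt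
  simp only [popTrim_eq, List.reverse_reverse]
  by_cases hmem : 2 ∈ arr
  · rw [if_neg (not_not_intro hmem)]
    -- extract first index f and last index L of 2
    have hA : (PySem.List.index? arr 2).isSome := (PySem.List.index?_isSome_iff arr 2).2 hmem
    obtain ⟨f, hf⟩ := Option.isSome_iff_exists.mp hA
    have hmemr : 2 ∈ arr.reverse := by simpa using hmem
    obtain ⟨j, hjdef⟩ := Option.isSome_iff_exists.mp ((PySem.List.index?_isSome_iff arr.reverse 2).2 hmemr)
    obtain ⟨hfn, hf2, hfmin⟩ := PySem.List.getElem_of_index?_eq_some hf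
    obtain ⟨hjn, hL2, hLmax⟩ := reverse_index_facts arr j hjdef
    set n := arr.length with hn
    set L := n - 1 - j with hL
    have hfL : f ≤ L := by
      by_contra hc
      exact hLmax f hfn (by omega) hf2
    -- A's side: the loop lands on (f, L) and the slice is drop/take
    have hloop := solutionLoop_eq arr f L hfn (by omega) hf2 hL2
      (fun k hk hlt => hfmin k hlt) hLmax 0 ((n : Int) - 1)
      le_rfl (by omega) (by omega) le_rfl
    simp only [hloop]
    rw [show ((L : Int)) + 1 = ((L + 1 : Nat) : Int) by push_cast; ring]
    rw [PySem.List.slice_natCast]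
    -- B's side: the two dropWhiles are drop f (front) and drop (n-1-L) (back of the remainder)
    have hd1 : arr.dropWhile (fun x => x ≠ 2) = arr.drop f :=
      dropWhile_eq_drop_of_first arr f hfn hf2 (fun k hk hlt => hfmin k hlt)
    rw [hd1]
    set D := arr.drop f with hD
    have hDlen : D.length = n - f := by simp [hD, hn]
    have hj' : n - 1 - L < D.length := by omega
    have hDl : (List.drop f arr).length = n - f := by simp [hn]
    have hDrl : D.reverse.length = n - f := by simp [hD, hn]
    have hd2 : D.reverse.dropWhile (fun x => x ≠ 2) = D.reverse.drop (n - 1 - L) := by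
      refine dropWhile_eq_drop_of_first _ _ (by omega) ?_ ?_
      · rw [List.getElem_reverse]
        have key : ∀ i (hi' : i < arr.length), i = L → arr[i] = 2 := by
          intro i hi' hiL; subst hiL; exact hL2
        simp only [hD, List.getElem_drop]
        exact key _ (by omega) (by omega)
      · intro k hk hklt
        rw [List.getElem_reverse]
        have hkD : D.length - 1 - k < D.length := by omega
        have : D[D.length - 1 - k]'hkD = arr[f + (D.length - 1 - k)]'(by omega) := by
          simp [hD, List.getElem_drop]
        rw [this]
        apply hLmax
        omega
    rw [hd2]
    rw [List.drop_reverse]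
    have hfin : D.length - (n - 1 - L) = L + 1 - f := by omega
    rw [hfin]
    have hne : D.take (L + 1 - f) ≠ [] := by
      have : (D.take (L + 1 - f)).length = L + 1 - f := by
        rw [List.length_take]; omega
      intro hc; rw [hc] at this; simp at this; omega
    simp [hne]
  · rw [if_pos hmem]
    have hall : arr.dropWhile (fun x => x ≠ 2) = [] := by
      rw [List.dropWhile_eq_nil_iff]
      intro x hx
      simp only [ne_eq, decide_eq_true_eq]
      intro h; rw [h] at hx; exact hmem hx
    rw [hall]
    simp
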